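-- pv_equiv track=rewrite | github.com/nayoon-kim/Algorithm | 2512.py | result
-- ===== SOURCE A (Python) =====
-- def result(n, lands, m):
--     lands.sort()
--     _max = lands[-1]
--     _min = 0
--     h = 0
--     result = 0
--
--     while _min <= _max:
--         _sum = 0
--         h = (_max + _min) // 2
--
--         for land in lands:
--             if land < h:
--                 _sum += land
--             else:
--                 _sum += h
--
--         if _sum <= m:
--             _min = h + 1
--             result = h
--         elif _sum > m: # _sum >= m
--             _max = h - 1
--
--     return result
-- ===== SOURCE B (Python) =====
-- def result(n, lands, m):
--     # same in-place sort side effect as A; return value is what matters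
--     lands.sort()
--     size = len(lands)
--     prefix = [0]
--     for x in lands:
--         prefix.append(prefix[-1] + x)
--     lo, hi = 0, lands[-1]
--     best = 0
--     while lo <= hi:
--         h = (lo + hi) // 2
--         # first index whose land is >= h (hand-rolled bisect_left)
--         i, j = 0, size
--         while i < j:
--             mid = (i + j) // 2
--             if lands[mid] < h:
--                 i = mid + 1
--             else:
--                 j = mid
--         total = prefix[i] + h * (size - i)
--         if total <= m:
--             best = h
--             lo = h + 1
--         else:
--             hi = h - 1
--     return best
-- ===== Notes on version B (the rewrite author's own statement) =====
-- stated objective: faster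
-- what changed: the O(n) inner scan summing min(land,h) in every bisection step is replaced by a sorted prefix-sum table plus a hand-rolled bisect_left, so each step costs O(log n) instead of O(n)
-- outside the precondition, e.g. on result(0, [], 10): A raises IndexError, B raises IndexError
import Mathlib
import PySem

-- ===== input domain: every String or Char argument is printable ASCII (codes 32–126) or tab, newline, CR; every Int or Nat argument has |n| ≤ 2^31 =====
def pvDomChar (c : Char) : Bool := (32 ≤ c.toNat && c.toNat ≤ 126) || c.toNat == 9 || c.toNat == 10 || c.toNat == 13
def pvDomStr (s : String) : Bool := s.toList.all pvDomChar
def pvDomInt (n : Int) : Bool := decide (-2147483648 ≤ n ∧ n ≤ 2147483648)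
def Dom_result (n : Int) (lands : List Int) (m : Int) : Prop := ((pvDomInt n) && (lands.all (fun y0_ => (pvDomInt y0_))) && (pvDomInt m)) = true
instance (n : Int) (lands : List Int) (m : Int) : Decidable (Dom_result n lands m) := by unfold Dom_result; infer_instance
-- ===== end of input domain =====

-- B replaces A's O(n) scan in each bisection step by prefix sums + a hand-rolled bisect_left
-- (asymptotically faster per step); both A and B sort `lands` in place (same side effect);
-- the theorem is about the return value.


-- ===== PORT A =====

-- the inner `for land in lands` scan of A
def sumScanA (h : Int) (xs : List Int) : Int :=
  xs.foldl (fun s land => if land < h then s + land else s + h) 0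

-- A's `while _min <= _max` loop; h = (_max + _min) // 2 exactly as written.
-- `fuel` is only a totality guard: hi - lo + 1 strictly drops each iteration, so the
-- fuel passed by `result` (initial interval + 1) is never exhausted.
def loopA (lands : List Int) (m : Int) : Nat → Int → Int → Int → Int
  | 0, _, _, res => res
  | fuel + 1, lo, hi, res =>
    if lo ≤ hi then
      let h := PySem.Int.floordiv (hi + lo) 2
      if sumScanA h lands ≤ m then loopA lands m fuel (h + 1) hi h
      else loopA lands m fuel lo (h - 1) res
    else res

def result (n : Int) (lands : List Int) (m : Int) : Int :=
  let xs := PySem.List.sorted lands (fun x => x)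
  match PySem.List.pyGet? xs (-1) with     -- lands[-1]: IndexError on [] (excluded by Pre_)
  | some mx => loopA xs m (mx + 2).toNat 0 mx 0
  | none => 0

-- ===== PORT B =====

-- B's hand-rolled bisect_left loop (`while i < j: …`); index always in range; `fuel` is
-- only a totality guard (j - i strictly shrinks, and callers pass length + 1)
def bisectLoop (xs : List Int) (h : Int) : Nat → Int → Int → Int
  | 0, i, _ => i
  | fuel + 1, i, j =>
    if i < j then
      let mid := PySem.Int.floordiv (i + j) 2
      if PySem.List.pyGetD xs mid 0 < h then bisectLoop xs h fuel (mid + 1) j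
      else bisectLoop xs h fuel i mid
    else i

-- B's `prefix = [0]; for x in lands: prefix.append(prefix[-1] + x)`
def buildPrefix (xs : List Int) : List Int :=
  xs.foldl (fun p x => p ++ [PySem.List.pyGetD p (-1) 0 + x]) [0]

-- B's `while lo <= hi` loop over the answer (`fuel` again only a totality guard)
def loopB (lands pre : List Int) (size m : Int) : Nat → Int → Int → Int → Int
  | 0, _, _, best => best
  | fuel + 1, lo, hi, best =>
    if lo ≤ hi then
      let h := PySem.Int.floordiv (lo + hi) 2
      let i := bisectLoop lands h (lands.length + 1) 0 size
      let total := PySem.List.pyGetD pre i 0 + h * (size - i)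
      if total ≤ m then loopB lands pre size m fuel (h + 1) hi h
      else loopB lands pre size m fuel lo (h - 1) best
    else best

def result_alt (n : Int) (lands : List Int) (m : Int) : Int :=
  let xs := PySem.List.sorted lands (fun x => x)
  let size : Int := xs.length
  let pre := buildPrefix xs
  match PySem.List.pyGet? xs (-1) with     -- lands[-1]: IndexError on [] (excluded by Pre_)
  | some last => loopB xs pre size m (last + 2).toNat 0 last 0
  | none => 0

-- ===== PRECONDITION & SPEC =====

-- A evaluates lands[-1], which raises IndexError on the empty list: Pre_ excludes only lands = []
def Pre_result (n : Int) (lands : List Int) (m : Int) : Prop := lands ≠ []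
instance (n : Int) (lands : List Int) (m : Int) : Decidable (Pre_result n lands m) := by unfold Pre_result; infer_instance

def pvWitness_result : Int × List Int × Int := (3, [5, 2, 4], 7)

def Spec_result (n : Int) (lands : List Int) (m : Int) (out : Int) : Prop := out = result_alt n lands m
instance (n : Int) (lands : List Int) (m : Int) (out : Int) : Decidable (Spec_result n lands m out) := by unfold Spec_result; infer_instance

-- ===== CLAIM (what is proved, stated in full; the proofs are below) =====
def Claim_equal_result : Prop := ∀ (n : Int) (lands : List Int) (m : Int), Dom_result n lands m → Pre_result n lands m → Spec_result n lands m (result n lands m)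

-- ===== LEMMAS AND PROOFS =====

-- running sums [s+x1, s+x1+x2, …] (proof-only model of B's prefix list)
def pvPartialSums (s : Int) : List Int → List Int
  | [] => []
  | x :: r => (s + x) :: pvPartialSums (s + x) r

theorem pvPartialSums_getElem? (xs : List Int) : ∀ (s : Int) (k : Nat), k < xs.length →
    (pvPartialSums s xs)[k]? = some (s + (xs.take (k + 1)).sum) := by
  induction xs with
  | nil => intro s k hk; simp at hk
  | cons x r ih =>
    intro s k hk
    cases k with
    | zero => simp [pvPartialSums]
    | succ k' =>
      simp only [pvPartialSums, List.getElem?_cons_succ, List.take, List.sum_cons]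
      rw [ih (s + x) k' (by simpa using hk)]
      congr 1
      ring

theorem buildPrefix_foldl (xs : List Int) : ∀ (p : List Int) (hp : p ≠ []),
    xs.foldl (fun p x => p ++ [PySem.List.pyGetD p (-1) 0 + x]) p
      = p ++ pvPartialSums (p.getLast hp) xs := by
  induction xs with
  | nil => intro p hp; simp [pvPartialSums]
  | cons x r ih =>
    intro p hp
    simp only [List.foldl_cons, PySem.List.pyGetD_neg_one p 0 hp]
    rw [ih (p ++ [p.getLast hp + x]) (by simp)]
    rw [List.getLast_append_singleton]
    simp [pvPartialSums]

theorem buildPrefix_eq (xs : List Int) : buildPrefix xs = 0 :: pvPartialSums 0 xs := by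
  unfold buildPrefix
  rw [buildPrefix_foldl xs [0] (by simp)]
  simp

theorem buildPrefix_get (xs : List Int) (k : Nat) (hk : k ≤ xs.length) :
    PySem.List.pyGetD (buildPrefix xs) (k : Int) 0 = (xs.take k).sum := by
  rw [PySem.List.pyGetD_natCast, buildPrefix_eq]
  cases k with
  | zero => simp
  | succ k' =>
    simp only [List.getD, List.getElem?_cons_succ]
    rw [pvPartialSums_getElem? xs 0 k' (by omega)]
    simp

-- sum over the "< h" block adds the elements
theorem foldl_lt_block (h : Int) (A : List Int) (hA : ∀ a ∈ A, a < h) :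
    ∀ s : Int, A.foldl (fun s land => if land < h then s + land else s + h) s = s + A.sum := by
  induction A with
  | nil => simp
  | cons a r ih =>
    intro s
    have ha : a < h := hA a (by simp)
    simp only [List.foldl_cons, if_pos ha, List.sum_cons]
    rw [ih (fun b hb => hA b (by simp [hb]))]
    ring

-- sum over the "≥ h" block adds h per element
theorem foldl_ge_block (h : Int) (B : List Int) (hB : ∀ b ∈ B, ¬ b < h) :
    ∀ s : Int, B.foldl (fun s land => if land < h then s + land else s + h) s = s + h * B.length := by
  induction B with
  | nil => simp
  | cons b r ih =>
    intro s
    have hb : ¬ b < h := hB b (by simp)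
    simp only [List.foldl_cons, if_neg hb, List.length_cons]
    rw [ih (fun c hc => hB c (by simp [hc]))]
    push_cast
    ring

-- on a sorted list every element of dropWhile (< h) is ≥ h
theorem dropWhile_all_ge (h : Int) (xs : List Int) (hs : xs.Pairwise (· ≤ ·)) :
    ∀ y ∈ xs.dropWhile (fun x => decide (x < h)), ¬ y < h := by
  induction xs with
  | nil => simp
  | cons x r ih =>
    rw [List.dropWhile_cons]
    by_cases hx : x < h
    · simp only [hx, decide_true]
      exact ih (List.pairwise_cons.mp hs).2
    · simp only [hx, decide_false]
      intro y hy
      rcases List.mem_cons.mp hy with rfl | hy'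
      · exact hx
      · have := (List.pairwise_cons.mp hs).1 y hy'
        omega

-- the inner scan of A equals takeWhile-sum + h * (rest length)
theorem sumScanA_split (h : Int) (xs : List Int) (hs : xs.Pairwise (· ≤ ·)) :
    sumScanA h xs = ((xs.takeWhile (fun x => decide (x < h))).sum : Int)
      + h * (xs.dropWhile (fun x => decide (x < h))).length := by
  unfold sumScanA
  conv_lhs => rw [← List.takeWhile_append_dropWhile (p := fun x => decide (x < h)) (l := xs)]
  rw [List.foldl_append]
  rw [foldl_ge_block h _ (dropWhile_all_ge h xs hs)]
  rw [foldl_lt_block h _ (fun a ha => by simpa using List.mem_takeWhile_imp ha)]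
  ring

-- indices below the takeWhile split carry elements < h
theorem idx_lt_of_lt_twLen (h : Int) (xs : List Int) (k : Nat) (hk : k < xs.length)
    (hlt : k < (xs.takeWhile (fun x => decide (x < h))).length) : xs[k] < h := by
  have hq : xs[k]? = (xs.takeWhile (fun x => decide (x < h)))[k]? := by
    conv_lhs => rw [← List.takeWhile_append_dropWhile (p := fun x => decide (x < h)) (l := xs)]
    exact List.getElem?_append_left hlt
  have hx : (xs.takeWhile (fun x => decide (x < h)))[k]'hlt = xs[k] := by
    have := List.getElem?_eq_getElem hk
    rw [hq, List.getElem?_eq_getElem hlt] at this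
    exact (Option.some.inj this)
  have hmem := List.getElem_mem hlt
  rw [hx] at hmem
  simpa using List.mem_takeWhile_imp hmem

-- indices at or beyond the split carry elements ≥ h (needs sortedness)
theorem idx_ge_of_twLen_le (h : Int) (xs : List Int) (hs : xs.Pairwise (· ≤ ·)) (k : Nat)
    (hk : k < xs.length) (hge : (xs.takeWhile (fun x => decide (x < h))).length ≤ k) :
    ¬ xs[k] < h := by
  have hq : xs[k]? = (xs.dropWhile (fun x => decide (x < h)))[k - (xs.takeWhile (fun x => decide (x < h))).length]? := by
    conv_lhs => rw [← List.takeWhile_append_dropWhile (p := fun x => decide (x < h)) (l := xs)]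
    exact List.getElem?_append_right hge
  have hsome : xs[k]? = some xs[k] := List.getElem?_eq_getElem hk
  rw [hsome] at hq
  have hmem : xs[k] ∈ xs.dropWhile (fun x => decide (x < h)) :=
    List.mem_of_getElem? hq.symm
  exact dropWhile_all_ge h xs hs _ hmem

-- B's binary search finds the takeWhile split point
theorem bisectLoop_eq (xs : List Int) (h : Int) (hs : xs.Pairwise (· ≤ ·)) :
    ∀ (fuel : Nat) (i j : Int), (j - i).toNat < fuel → 0 ≤ i →
      i ≤ ((xs.takeWhile (fun x => decide (x < h))).length : Int) →
      ((xs.takeWhile (fun x => decide (x < h))).length : Int) ≤ j → j ≤ (xs.length : Int) →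
      bisectLoop xs h fuel i j = ((xs.takeWhile (fun x => decide (x < h))).length : Int) := by
  intro fuel
  induction fuel with
  | zero => intro i j hf; omega
  | succ fuel ih => ?_
  intro i j hf h0 hit htj hjl
  simp only [bisectLoop]
  by_cases hij : i < j
  · simp only [if_pos hij]
    have hb := PySem.Int.floordiv_two_mid_bounds (le_of_lt hij)
    have hmlt : PySem.Int.floordiv (i + j) 2 < j := by
      have := PySem.Int.floordiv_lt_iff_lt_mul (a := i + j) (b := 2) (q := j) (by omega)
      omega
    have hmid0 : 0 ≤ PySem.Int.floordiv (i + j) 2 := by omega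
    have hmlen : PySem.Int.floordiv (i + j) 2 < (xs.length : Int) := by omega
    rw [PySem.List.pyGetD_eq_getElem xs 0 hmid0 hmlen]
    by_cases hcase : xs[(PySem.Int.floordiv (i + j) 2).toNat] < h
    · rw [if_pos hcase]
      have hmt : PySem.Int.floordiv (i + j) 2 < ((xs.takeWhile (fun x => decide (x < h))).length : Int) := by
        by_contra hnot
        exact idx_ge_of_twLen_le h xs hs _ (by omega) (by omega) hcase
      exact ih _ j (by omega) (by omega) (by omega) htj hjl
    · rw [if_neg hcase]
      have hmt : ((xs.takeWhile (fun x => decide (x < h))).length : Int) ≤ PySem.Int.floordiv (i + j) 2 := by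
        by_contra hnot
        exact hcase (idx_lt_of_lt_twLen h xs _ (by omega) (by omega))
      exact ih i _ (by omega) h0 hit hmt (by omega)
  · simp only [if_neg hij]
    omega

-- B's per-step total equals A's inner scan
theorem total_eq (xs : List Int) (hs : xs.Pairwise (· ≤ ·)) (h : Int) :
    PySem.List.pyGetD (buildPrefix xs) (bisectLoop xs h (xs.length + 1) 0 (xs.length : Int)) 0
      + h * ((xs.length : Int) - bisectLoop xs h (xs.length + 1) 0 (xs.length : Int)) = sumScanA h xs := by
  have htwle : (xs.takeWhile (fun x => decide (x < h))).length ≤ xs.length :=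
    (List.takeWhile_sublist _).length_le
  have hb := bisectLoop_eq xs h hs (xs.length + 1) 0 (xs.length : Int) (by omega) le_rfl
      (by exact_mod_cast Int.natCast_nonneg _) (by exact_mod_cast htwle) le_rfl
  rw [hb, buildPrefix_get xs _ htwle]
  rw [sumScanA_split h xs hs]
  set tw := xs.takeWhile (fun x => decide (x < h)) with htw
  set dw := xs.dropWhile (fun x => decide (x < h)) with hdw
  have hsplit : tw ++ dw = xs := by
    rw [htw, hdw]; exact List.takeWhile_append_dropWhile
  have htake : xs.take tw.length = tw := by
    conv_lhs => rw [← hsplit]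
    exact List.take_left
  have hlen : xs.length = tw.length + dw.length := by
    conv_lhs => rw [← hsplit]
    simp
  rw [htake, hlen]
  push_cast
  ring

-- the two whole loops agree on a sorted list
theorem loop_eq (xs : List Int) (hs : xs.Pairwise (· ≤ ·)) (m : Int) :
    ∀ (fuel : Nat) (lo hi res : Int),
      loopA xs m fuel lo hi res = loopB xs (buildPrefix xs) (xs.length : Int) m fuel lo hi res := by
  intro fuel
  induction fuel with
  | zero => intro lo hi res; rfl
  | succ fuel ih => ?_
  intro lo hi res
  simp only [loopA, loopB]
  by_cases hle : lo ≤ hi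
  · simp only [if_pos hle, Int.add_comm hi lo]
    rw [total_eq xs hs (PySem.Int.floordiv (lo + hi) 2)]
    by_cases hsum : sumScanA (PySem.Int.floordiv (lo + hi) 2) xs ≤ m
    · rw [if_pos hsum, if_pos hsum]
      exact ih _ hi _
    · rw [if_neg hsum, if_neg hsum]
      exact ih lo _ res
  · simp only [if_neg hle]

-- ===== VERDICT (by name: the statement is the Claim_ definition above) =====
theorem result_spec : Claim_equal_result := by
  intro n lands m _ hpre
  unfold Spec_result result result_alt
  have hs := PySem.List.sorted_pairwise lands (fun x => x)
  simp only []
  cases hget : PySem.List.pyGet? (PySem.List.sorted lands (fun x => x)) (-1) with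
  | none => rfl
  | some mx => exact loop_eq _ hs m _ 0 mx 0
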